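-- pv_equiv track=rewrite | github.com/mila-iqia/paperoni | paperoni/sources/scrapers/pdfanal.py | possible_superscripts
-- ===== SOURCE A (Python) =====
-- def possible_superscripts(sup):
--     if "," in sup:
--         for entry in sup.split(","):
--             yield from possible_superscripts(entry)
--     yield sup
--     if len(sup) > 1:
--         for char in sup:
--             if char.strip():
--                 yield char
-- ===== SOURCE B (Python) =====
-- def possible_superscripts(sup):
--     # Iterative: the recursion in A only ever runs one level deep (split(",")
--     # entries are comma-free), so inline it as a single loop over the entries.
--     for entry in (sup.split(",") if "," in sup else []):
--         yield entry
--         if len(entry) > 1: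
--             for c in entry:
--                 if c.strip():
--                     yield c
--     yield sup
--     if len(sup) > 1:
--         for c in sup:
--             if c.strip():
--                 yield c
-- ===== Notes on version B (the rewrite author's own statement) =====
-- stated objective: simpler
-- what changed: Replaces A's recursive generator with a flat iterative one: since split(',') entries never contain a comma, the recursion is at most one level deep and is inlined as a single loop over the entries followed by the whole-string yields.
import Mathlib
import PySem

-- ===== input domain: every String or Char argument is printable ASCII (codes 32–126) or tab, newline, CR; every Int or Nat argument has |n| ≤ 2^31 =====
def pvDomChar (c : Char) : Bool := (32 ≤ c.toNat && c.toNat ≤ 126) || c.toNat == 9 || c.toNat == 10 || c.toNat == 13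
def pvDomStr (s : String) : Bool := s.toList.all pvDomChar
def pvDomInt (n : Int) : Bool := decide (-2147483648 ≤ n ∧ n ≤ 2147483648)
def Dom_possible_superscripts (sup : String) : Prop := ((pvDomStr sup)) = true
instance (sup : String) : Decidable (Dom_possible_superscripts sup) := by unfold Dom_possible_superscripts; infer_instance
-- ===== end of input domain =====

-- B changes: A's recursive generator is flattened to a single iterative pass
-- (split(",") entries are comma-free, so the recursion is one level deep); simpler.

-- ===== PORT A =====

-- "splitOn … [','] entries contain no ','" — needed by the port's own termination proof, cited in decreasing_by
theorem pvSplitGo_no_sep (c : Char) :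
    ∀ fuel l cur acc, l.length < fuel → (∀ x ∈ cur, x ≠ c) → (∀ t ∈ acc, ∀ x ∈ t, x ≠ c) →
      ∀ t ∈ PySem.Chars.splitOn.go [c] fuel l cur acc, ∀ x ∈ t, x ≠ c := by
  intro fuel
  induction fuel with
  | zero => intro l cur acc h; exact absurd h (Nat.not_lt_zero _)
  | succ n ih =>
    intro l cur acc hlen hcur hacc t ht
    match l with
    | [] =>
      simp only [PySem.Chars.splitOn.go] at ht
      simp only [List.mem_reverse, List.mem_cons] at ht
      rcases ht with h | h
      · subst h; intro x hx; exact hcur x (List.mem_reverse.mp hx)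
      · exact hacc t h
    | d :: rest =>
      simp only [PySem.Chars.splitOn.go] at ht
      by_cases hp : [c].isPrefixOf (d :: rest) = true
      · rw [if_pos hp] at ht
        have hd : d = c := by
          simp [List.isPrefixOf] at hp
          exact hp.symm
        refine ih _ [] _ (by simp at hlen ⊢; omega) (by simp) ?_ t ht
        intro u hu
        rcases List.mem_cons.mp hu with h | h
        · subst h; intro x hx; exact hcur x (List.mem_reverse.mp hx)
        · exact hacc u h
      · rw [if_neg hp] at ht
        have hd : d ≠ c := by
          intro h; subst h
          exact hp (by simp [List.isPrefixOf])
        refine ih rest (d :: cur) acc (by simp at hlen ⊢; omega) ?_ hacc t ht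
        intro x hx
        rcases List.mem_cons.mp hx with h | h
        · subst h; exact hd
        · exact hcur x h

theorem pvSplit_no_sep (cs : List Char) (c : Char) :
    ∀ t ∈ PySem.Chars.splitOn cs [c], c ∉ t := by
  intro t ht hx
  exact pvSplitGo_no_sep c (cs.length + 1) cs [] [] (by omega) (by simp) (by simp) t
    (by simpa [PySem.Chars.splitOn] using ht) c hx rfl

-- transliteration of A (recursive generator collected into a list, in yield order)
def possible_superscripts (sup : String) : List String :=
  (if PySem.Chars.isIn [','] sup.toList then
      (PySem.Chars.splitOn sup.toList [',']).attach.flatMap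
        (fun e => possible_superscripts (String.ofList e.1))
    else [])
  ++ [sup]
  ++ (if sup.toList.length > 1 then
        (sup.toList.filter (fun c => decide (PySem.Chars.strip [c] ≠ []))).map
          (fun c => String.ofList [c])
      else [])
termination_by sup.toList.count ','
decreasing_by
  rename_i hin
  simp only [String.toList_ofList]
  have h0 : e.1.count ',' = 0 :=
    List.count_eq_zero.mpr (pvSplit_no_sep sup.toList ',' e.1 e.2)
  have h1 : ',' ∈ sup.toList := (List.singleton_infix_iff ',' sup.toList).mp
    ((PySem.Chars.isIn_iff_infix [','] sup.toList).mp hin)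
  have h2 : 1 ≤ sup.toList.count ',' := List.count_pos_iff.mpr h1
  omega

-- ===== PORT B =====

def pvKeep (c : Char) : Bool := decide (PySem.Chars.strip [c] ≠ [])

def pvChars (s : List Char) : List String :=
  (s.filter pvKeep).map (fun c => String.ofList [c])

-- transliteration of B (single iterative pass)
def possible_superscripts_alt (sup : String) : List String :=
  (if PySem.Chars.isIn [','] sup.toList then PySem.Chars.splitOn sup.toList [',']
   else []).flatMap
    (fun e => String.ofList e :: (if e.length > 1 then pvChars e else []))
  ++ [sup]
  ++ (if sup.toList.length > 1 then pvChars sup.toList else [])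

-- ===== PRECONDITION & SPEC =====
def Spec_possible_superscripts (sup : String) (out : List String) : Prop := out = possible_superscripts_alt sup
instance (sup : String) (out : List String) : Decidable (Spec_possible_superscripts sup out) := by unfold Spec_possible_superscripts; infer_instance

-- ===== CLAIM (what is proved, stated in full; the proofs are below) =====
def Claim_equal_possible_superscripts : Prop := ∀ (sup : String), Dom_possible_superscripts sup → Spec_possible_superscripts sup (possible_superscripts sup)

-- ===== LEMMAS AND PROOFS =====

theorem pvKeep_eq : pvKeep = fun c => !decide (PySem.Chars.strip [c] = []) := by
  funext c; simp [pvKeep]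

-- on a comma-free string A's recursion stops: it yields the string, then its chars
theorem pvA_no_comma (s : String) (h : ',' ∉ s.toList) :
    possible_superscripts s =
      s :: (if s.toList.length > 1 then pvChars s.toList else []) := by
  rw [possible_superscripts]
  have hin : PySem.Chars.isIn [','] s.toList = false := by
    rw [PySem.Chars.isIn_eq_false_iff _ _]
    intro hi; exact h ((List.singleton_infix_iff ',' s.toList).mp hi)
  rw [hin]
  simp [pvChars, pvKeep_eq]

theorem pv_main (sup : String) :
    possible_superscripts sup = possible_superscripts_alt sup := by
  rw [possible_superscripts, possible_superscripts_alt]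
  by_cases hin : PySem.Chars.isIn [','] sup.toList = true
  · rw [if_pos hin, if_pos hin]
    congr 2
    simp only [List.flatMap_subtype, List.unattach_attach]
    apply List.flatMap_congr  -- pointwise: each entry is comma-free, so A's recursion inlines
    intro e he
    rw [pvA_no_comma (String.ofList e) (by rw [String.toList_ofList]; exact pvSplit_no_sep sup.toList ',' e he)]
    rw [String.toList_ofList]
  · rw [if_neg hin, if_neg hin]
    simp [pvChars, pvKeep_eq]

-- ===== VERDICT (by name: the statement is the Claim_ definition above) =====
theorem possible_superscripts_spec : Claim_equal_possible_superscripts := by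
  intro sup _
  unfold Spec_possible_superscripts
  exact pv_main sup
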